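-- pv_equiv track=rewrite | github.com/ArtemEfimov/Checkio | escher/Compass_Map_and_Spyglass.py | navigation
-- ===== SOURCE A (Python) =====
-- def navigation(seaside):
--     """ Description """
--     y, c, m, s = [0, 0], [0, 0], [0, 0], [0, 0]
--     for row, _ in enumerate(seaside):
--         for column, _ in enumerate(seaside[row]):
--             if seaside[row][column] == 'Y':
--                 y = [row, column]
--             if seaside[row][column] == 'C':
--                 c = [row, column]
--             if seaside[row][column] == 'M':
--                 m = [row, column]
--             if seaside[row][column] == 'S':
--                 s = [row, column]
--
--     distance = 0
--     distance += max(abs(y[0] - c[0]), abs(y[1] - c[1]))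
--     distance += max(abs(y[0] - m[0]), abs(y[1] - m[1]))
--     distance += max(abs(y[0] - s[0]), abs(y[1] - s[1]))
--     return distance
-- ===== SOURCE B (Python) =====
-- def navigation(seaside):
--     """ Description """
--     def last_pos(ch):
--         pos = [0, 0]
--         for r, line in enumerate(seaside):
--             col = line.rfind(ch)
--             if col != -1:
--                 pos = [r, col]
--         return pos
--
--     y = last_pos('Y')
--     distance = 0
--     for p in (last_pos('C'), last_pos('M'), last_pos('S')):
--         distance += max(abs(y[0] - p[0]), abs(y[1] - p[1]))
--     return distance
-- ===== Notes on version B (the rewrite author's own statement) =====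
-- stated objective: alternative
-- what changed: A makes one combined row-major pass testing each cell against all four markers with four if-branches; B instead locates each marker independently with a last-occurrence helper that uses str.rfind per line (one pass per marker, no per-cell branching), then sums the three Chebyshev distances from Y.
import Mathlib
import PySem

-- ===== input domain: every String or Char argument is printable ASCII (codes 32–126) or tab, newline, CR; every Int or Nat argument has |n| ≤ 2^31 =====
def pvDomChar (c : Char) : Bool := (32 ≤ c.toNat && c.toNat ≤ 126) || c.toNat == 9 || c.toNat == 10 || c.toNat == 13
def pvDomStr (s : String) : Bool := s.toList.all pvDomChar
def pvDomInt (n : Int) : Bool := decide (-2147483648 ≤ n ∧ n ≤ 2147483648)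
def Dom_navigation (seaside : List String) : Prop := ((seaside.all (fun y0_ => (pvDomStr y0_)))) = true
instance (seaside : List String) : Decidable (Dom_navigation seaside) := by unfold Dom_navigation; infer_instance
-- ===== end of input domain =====

-- B replaces A's single combined scan (four if-branches per cell) by one last-occurrence
-- pass per marker using str.rfind on each line (objective: alternative decomposition).


-- ===== PORT A =====
def navigation (seaside : List String) : Int :=
  let st :=
    (PySem.List.enumerate seaside).foldl
      (fun (st : (Int × Int) × (Int × Int) × (Int × Int) × (Int × Int)) rp =>
        (PySem.List.enumerate rp.2.toList).foldl
          (fun st cp =>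
            let y := if cp.2 = 'Y' then (rp.1, cp.1) else st.1
            let c := if cp.2 = 'C' then (rp.1, cp.1) else st.2.1
            let m := if cp.2 = 'M' then (rp.1, cp.1) else st.2.2.1
            let s := if cp.2 = 'S' then (rp.1, cp.1) else st.2.2.2
            (y, c, m, s)) st)
      ((0, 0), (0, 0), (0, 0), (0, 0))
  let y := st.1
  let c := st.2.1
  let m := st.2.2.1
  let s := st.2.2.2
  let d0 : Int := 0
  let d1 := d0 + max |y.1 - c.1| |y.2 - c.2|
  let d2 := d1 + max |y.1 - m.1| |y.2 - m.2|
  d2 + max |y.1 - s.1| |y.2 - s.2|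

-- ===== PORT B =====
-- B's helper last_pos: one per-marker pass, str.rfind per line
def lastPos (seaside : List String) (ch : String) : Int × Int :=
  (PySem.List.enumerate seaside).foldl
    (fun pos rp =>
      let col := PySem.Str.rfind rp.2 ch
      if col ≠ -1 then (rp.1, col) else pos)
    (0, 0)

def navigation_alt (seaside : List String) : Int :=
  let y := lastPos seaside "Y"
  [lastPos seaside "C", lastPos seaside "M", lastPos seaside "S"].foldl
    (fun d p => d + max |y.1 - p.1| |y.2 - p.2|) 0

-- ===== PRECONDITION & SPEC =====
def Spec_navigation (seaside : List String) (out : Int) : Prop := out = navigation_alt seaside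
instance (seaside : List String) (out : Int) : Decidable (Spec_navigation seaside out) := by unfold Spec_navigation; infer_instance

-- ===== CLAIM (what is proved, stated in full; the proofs are below) =====
def Claim_equal_navigation : Prop := ∀ (seaside : List String), Dom_navigation seaside → Spec_navigation seaside (navigation seaside)

-- ===== LEMMAS AND PROOFS =====

-- index (from the front) of the LAST occurrence of ch, or none
def lastIdx : List Char → Char → Option Nat
  | [], _ => none
  | a :: t, ch =>
    match lastIdx t ch with
    | some j => some (j + 1)
    | none => if a = ch then some 0 else none

-- A's per-cell update for ONE marker character over one row's enumerated cells
def updRow (ch : Char) (row : Int) (p : Int × Int) (cells : List (Int × Char)) : Int × Int :=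
  cells.foldl (fun p cp => if cp.2 = ch then (row, cp.1) else p) p

-- A's per-row step for ONE marker character, folded over the enumerated grid
def updAll (ch : Char) (rps : List (Int × String)) (p : Int × Int) : Int × Int :=
  rps.foldl (fun p rp => updRow ch rp.1 p (PySem.List.enumerate rp.2.toList)) p

theorem lastIdx_append (ds : List Char) (d ch : Char) :
    lastIdx (ds ++ [d]) ch = if d = ch then some ds.length else lastIdx ds ch := by
  induction ds with
  | nil => simp [lastIdx]
  | cons a t ih =>
    simp only [List.cons_append, lastIdx, ih]
    by_cases hd : d = ch
    · simp [hd]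
    · simp [hd]

theorem isPrefixOf_single_append {ch d : Char} (h : d ≠ ch) (l : List Char) :
    [ch].isPrefixOf (l ++ [d]) = [ch].isPrefixOf l := by
  cases l with
  | nil => simp [List.isPrefixOf, Ne.symm h]
  | cons a t => simp [List.isPrefixOf]

theorem isPrefixOf_single_drop_append {ch d : Char} (h : d ≠ ch) (ds : List Char) (k : Nat) :
    [ch].isPrefixOf ((ds ++ [d]).drop k) = [ch].isPrefixOf (ds.drop k) := by
  by_cases hk : k ≤ ds.length
  · rw [List.drop_append_of_le_length hk, isPrefixOf_single_append h]
  · rw [List.drop_eq_nil_of_le (by simp; omega), List.drop_eq_nil_of_le (by omega)]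

theorem go_succ (s sub : List Char) (j : Nat) :
    PySem.Chars.rfind.go s sub (j + 1) =
      if sub.isPrefixOf (s.drop (j + 1)) then ((j : Int) + 1) else PySem.Chars.rfind.go s sub j := by
  rw [PySem.Chars.rfind.go]; push_cast; rfl

theorem go_append_ne {ch d : Char} (h : d ≠ ch) (ds : List Char) :
    ∀ x, PySem.Chars.rfind.go (ds ++ [d]) [ch] x = PySem.Chars.rfind.go ds [ch] x := by
  intro x
  induction x with
  | zero =>
    rw [PySem.Chars.rfind.go, PySem.Chars.rfind.go]
    have := isPrefixOf_single_drop_append h ds 0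
    simp only [List.drop_zero] at this
    rw [this]
  | succ j ih =>
    rw [go_succ, go_succ, isPrefixOf_single_drop_append h ds (j + 1), ih]

theorem rfind_single_append (ds : List Char) (d ch : Char) :
    PySem.Chars.rfind (ds ++ [d]) [ch] =
      if d = ch then (ds.length : Int) else PySem.Chars.rfind ds [ch] := by
  unfold PySem.Chars.rfind
  simp only [List.length_append, List.length_singleton]
  rw [go_succ, if_neg (by rw [List.drop_eq_nil_of_le (by simp)]; simp [List.isPrefixOf])]
  by_cases hd : d = ch
  · subst hd
    cases hl : ds.length with
    | zero =>
      rw [PySem.Chars.rfind.go]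
      have : ds = [] := List.eq_nil_of_length_eq_zero hl
      subst this
      simp [List.isPrefixOf]
    | succ j =>
      rw [go_succ, ← hl, List.drop_append_of_le_length (le_refl _), List.drop_length]
      simp [List.isPrefixOf, hl]
  · rw [if_neg hd, go_append_ne hd]

theorem rfind_single_eq_lastIdx (cs : List Char) (ch : Char) :
    PySem.Chars.rfind cs [ch] =
      match lastIdx cs ch with
      | some j => (j : Int)
      | none => -1 := by
  induction cs using List.reverseRecOn with
  | nil => simp [PySem.Chars.rfind, PySem.Chars.rfind.go, lastIdx, List.isPrefixOf]
  | append_singleton ds d ih =>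
    rw [rfind_single_append, lastIdx_append]
    by_cases hd : d = ch
    · simp [hd]
    · rw [if_neg hd, if_neg hd, ih]

theorem updRow_eq (ch : Char) (row : Int) (cs : List Char) :
    ∀ (k : Int) (p : Int × Int),
      updRow ch row p (PySem.List.enumerate cs k) =
        match lastIdx cs ch with
        | some j => (row, k + (j : Int))
        | none => p := by
  induction cs with
  | nil => intro k p; simp [updRow, PySem.List.enumerate_nil, lastIdx]
  | cons a t ih =>
    intro k p
    rw [PySem.List.enumerate_cons]
    simp only [updRow, List.foldl_cons]
    have h1 := ih (k + 1) (if a = ch then (row, k) else p)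
    unfold updRow at h1
    rw [h1]
    cases h : lastIdx t ch with
    | some j =>
      simp only [lastIdx, h]
      rw [Prod.mk.injEq]
      constructor
      · rfl
      · push_cast; ring
    | none =>
      by_cases ha : a = ch <;> simp [lastIdx, h, ha]

theorem updRow_rfind (ch : Char) (row : Int) (cs : List Char) (p : Int × Int) :
    updRow ch row p (PySem.List.enumerate cs) =
      if PySem.Chars.rfind cs [ch] ≠ -1 then (row, PySem.Chars.rfind cs [ch]) else p := by
  rw [show PySem.List.enumerate cs = PySem.List.enumerate cs 0 from rfl,
      updRow_eq ch row cs 0 p, rfind_single_eq_lastIdx]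
  cases h : lastIdx cs ch with
  | none => simp
  | some j => simp

theorem updAll_eq_lastPos (ch' : Char) (ch : String) (h : ch.toList = [ch']) (seaside : List String) :
    updAll ch' (PySem.List.enumerate seaside) (0, 0) = lastPos seaside ch := by
  unfold updAll lastPos
  have hf : (fun (p : Int × Int) (rp : Int × String) =>
        updRow ch' rp.1 p (PySem.List.enumerate rp.2.toList)) =
      (fun pos rp =>
        let col := PySem.Str.rfind rp.2 ch
        if col ≠ -1 then (rp.1, col) else pos) := by
    funext p rp
    simp only [PySem.Str.rfind_eq, h, updRow_rfind]
  rw [hf]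

theorem inner_decomp (row : Int) (cells : List (Int × Char)) :
    ∀ (st : (Int × Int) × (Int × Int) × (Int × Int) × (Int × Int)),
      cells.foldl
        (fun st cp =>
          let y := if cp.2 = 'Y' then (row, cp.1) else st.1
          let c := if cp.2 = 'C' then (row, cp.1) else st.2.1
          let m := if cp.2 = 'M' then (row, cp.1) else st.2.2.1
          let s := if cp.2 = 'S' then (row, cp.1) else st.2.2.2
          (y, c, m, s)) st =
      (updRow 'Y' row st.1 cells, updRow 'C' row st.2.1 cells,
       updRow 'M' row st.2.2.1 cells, updRow 'S' row st.2.2.2 cells) := by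
  induction cells with
  | nil => intro st; simp [updRow]
  | cons cp cells ih =>
    intro st
    rw [List.foldl_cons, ih]
    simp [updRow]

theorem outer_decomp (rps : List (Int × String)) :
    ∀ (st : (Int × Int) × (Int × Int) × (Int × Int) × (Int × Int)),
      rps.foldl
        (fun st rp =>
          (PySem.List.enumerate rp.2.toList).foldl
            (fun st cp =>
              let y := if cp.2 = 'Y' then (rp.1, cp.1) else st.1
              let c := if cp.2 = 'C' then (rp.1, cp.1) else st.2.1
              let m := if cp.2 = 'M' then (rp.1, cp.1) else st.2.2.1
              let s := if cp.2 = 'S' then (rp.1, cp.1) else st.2.2.2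
              (y, c, m, s)) st) st =
      (updAll 'Y' rps st.1, updAll 'C' rps st.2.1, updAll 'M' rps st.2.2.1, updAll 'S' rps st.2.2.2) := by
  induction rps with
  | nil => intro st; simp [updAll]
  | cons rp tail ih =>
    intro st
    rw [List.foldl_cons, inner_decomp rp.1, ih]
    simp [updAll]

-- ===== VERDICT (by name: the statement is the Claim_ definition above) =====
theorem navigation_spec : Claim_equal_navigation := by
  intro seaside _
  unfold Spec_navigation navigation navigation_alt
  rw [outer_decomp]
  rw [updAll_eq_lastPos 'Y' "Y" rfl, updAll_eq_lastPos 'C' "C" rfl,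
      updAll_eq_lastPos 'M' "M" rfl, updAll_eq_lastPos 'S' "S" rfl]
  simp [List.foldl]
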